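-- pv_equiv track=rewrite | github.com/peoplepeople000/Big-Data-Final-Project | metadata_analysis.py | _detect_special_columns
-- ===== SOURCE A (Python) =====
-- from typing import Dict, Iterable, List, Optional, Tuple
--
-- def _detect_special_columns(columns: Iterable[Dict]) -> Dict[str, bool]:
--     """Heuristics to flag datasets that contain spatial/date/year columns."""
--     has_location = False
--     has_date = False
--     has_year = False
--
--     for col in columns or []:
--         dtype = (col.get("dataTypeName") or "").lower()
--         field = (col.get("fieldName") or "").lower()
--         name = (col.get("name") or "").lower()
--
--         if dtype in {"location", "point", "multipolygon", "polygon"}: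
--             has_location = True
--         if any(keyword in field for keyword in ("latitude", "longitude", "geom", "geocode", "borough")):
--             has_location = True
--
--         if dtype in {"calendar_date", "floating_timestamp", "date", "meta_data", "timestamp"}:
--             has_date = True
--         if "date" in field or "date" in name:
--             has_date = True
--
--         if dtype in {"number", "text"} and "year" in field:
--             has_year = True
--         if "fiscal_year" in field or "school_year" in field:
--             has_year = True
--
--     return {
--         "has_location_column": has_location,
--         "has_date_column": has_date,
--         "has_year_column": has_year,
--     }
-- ===== SOURCE B (Python) =====
-- def _detect_special_columns(columns):
--     """Heuristics to flag datasets that contain spatial/date/year columns.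
--
--     Data-driven: a declarative rule table is interpreted by a tiny generic
--     matcher instead of hard-coding the three flags' conditions in a loop.
--     Each rule is (output_key, clauses); a clause is a conjunction
--     (dtype_set_or_None, field_substring_or_None, name_substring_or_None),
--     and a rule fires if any clause matches any column.
--     """
--     RULES = [
--         ("has_location_column", [
--             (("location", "point", "multipolygon", "polygon"), None, None),
--             (None, "latitude", None),
--             (None, "longitude", None),
--             (None, "geom", None),
--             (None, "geocode", None),
--             (None, "borough", None),
--         ]),
--         ("has_date_column", [
--             (("calendar_date", "floating_timestamp", "date", "meta_data",
--               "timestamp"), None, None),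
--             (None, "date", None),
--             (None, None, "date"),
--         ]),
--         ("has_year_column", [
--             (("number", "text"), "year", None),
--             (None, "fiscal_year", None),
--             (None, "school_year", None),
--         ]),
--     ]
--
--     cols = list(columns or [])
--
--     def clause_hit(col, clause):
--         dtypes, field_kw, name_kw = clause
--         if dtypes is not None and (col.get("dataTypeName") or "").lower() not in dtypes:
--             return False
--         if field_kw is not None and field_kw not in (col.get("fieldName") or "").lower():
--             return False
--         if name_kw is not None and name_kw not in (col.get("name") or "").lower():
--             return False
--         return True
--
--     return {
--         key: any(clause_hit(col, cl) for col in cols for cl in clauses)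
--         for key, clauses in RULES
--     }
-- ===== Notes on version B (the rewrite author's own statement) =====
-- stated objective: alternative
-- what changed: A's single loop hard-coding three flag conditions is replaced by a declarative rule table (key, clauses) interpreted by one generic clause matcher; the result dict is built by iterating over the rules.
import Mathlib
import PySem

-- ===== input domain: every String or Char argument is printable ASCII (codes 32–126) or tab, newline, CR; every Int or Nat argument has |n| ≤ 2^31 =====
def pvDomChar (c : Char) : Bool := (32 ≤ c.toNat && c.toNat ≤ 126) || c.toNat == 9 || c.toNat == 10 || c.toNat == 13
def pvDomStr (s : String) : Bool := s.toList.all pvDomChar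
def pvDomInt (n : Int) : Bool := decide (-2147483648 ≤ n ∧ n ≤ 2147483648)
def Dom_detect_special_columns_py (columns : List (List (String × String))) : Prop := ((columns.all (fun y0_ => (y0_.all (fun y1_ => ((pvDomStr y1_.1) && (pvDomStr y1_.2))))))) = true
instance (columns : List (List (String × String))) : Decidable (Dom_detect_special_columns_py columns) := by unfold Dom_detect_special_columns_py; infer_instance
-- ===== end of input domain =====

-- B replaces A's loop with hard-coded flag conditions by a declarative rule table interpreted by one generic clause matcher (objective: alternative decomposition, same cost).

-- ===== PORT A =====
-- col.get(k) or "": first-match lookup, None and "" both give "" (x or "" is "" for falsy x)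
def dsGetLow (col : List (String × String)) (k : String) : String :=
  PySem.Str.lower (PySem.Dict.getD (PySem.Dict.mk col) k "")

def dsStepA (st : Bool × Bool × Bool) (col : List (String × String)) : Bool × Bool × Bool :=
  let dtype := dsGetLow col "dataTypeName"
  let field := dsGetLow col "fieldName"
  let name := dsGetLow col "name"
  let hl := st.1
  let hd := st.2.1
  let hy := st.2.2
  let hl := if dtype == "location" || dtype == "point" || dtype == "multipolygon" || dtype == "polygon" then true else hl
  let hl := if ["latitude", "longitude", "geom", "geocode", "borough"].any (fun kw => PySem.Str.isIn kw field) then true else hl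
  let hd := if dtype == "calendar_date" || dtype == "floating_timestamp" || dtype == "date" || dtype == "meta_data" || dtype == "timestamp" then true else hd
  let hd := if PySem.Str.isIn "date" field || PySem.Str.isIn "date" name then true else hd
  let hy := if (dtype == "number" || dtype == "text") && PySem.Str.isIn "year" field then true else hy
  let hy := if PySem.Str.isIn "fiscal_year" field || PySem.Str.isIn "school_year" field then true else hy
  (hl, hd, hy)

def detect_special_columns_py (columns : List (List (String × String))) : List (String × Bool) :=
  let st := columns.foldl dsStepA (false, false, false)
  [("has_location_column", st.1), ("has_date_column", st.2.1), ("has_year_column", st.2.2)]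

-- ===== PORT B =====
-- a clause: (optional dtype set, optional field substring, optional name substring), all present parts must match
def dsClauseHit (col : List (String × String))
    (c : Option (List String) × Option String × Option String) : Bool :=
  (match c.1 with
   | none => true
   | some ds => ds.contains (dsGetLow col "dataTypeName")) &&
  (match c.2.1 with
   | none => true
   | some kw => PySem.Str.isIn kw (dsGetLow col "fieldName")) &&
  (match c.2.2 with
   | none => true
   | some kw => PySem.Str.isIn kw (dsGetLow col "name"))

def dsLocClauses : List (Option (List String) × Option String × Option String) :=
  [(some ["location", "point", "multipolygon", "polygon"], none, none),
   (none, some "latitude", none),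
   (none, some "longitude", none),
   (none, some "geom", none),
   (none, some "geocode", none),
   (none, some "borough", none)]

def dsDateClauses : List (Option (List String) × Option String × Option String) :=
  [(some ["calendar_date", "floating_timestamp", "date", "meta_data", "timestamp"], none, none),
   (none, some "date", none),
   (none, none, some "date")]

def dsYearClauses : List (Option (List String) × Option String × Option String) :=
  [(some ["number", "text"], some "year", none),
   (none, some "fiscal_year", none),
   (none, some "school_year", none)]

def dsRules : List (String × List (Option (List String) × Option String × Option String)) :=
  [("has_location_column", dsLocClauses),
   ("has_date_column", dsDateClauses),
   ("has_year_column", dsYearClauses)]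

def detect_special_columns_py_alt (columns : List (List (String × String))) : List (String × Bool) :=
  dsRules.map (fun r => (r.1, columns.any (fun col => r.2.any (dsClauseHit col))))

-- ===== PRECONDITION & SPEC =====
def Spec_detect_special_columns_py (columns : List (List (String × String))) (out : List (String × Bool)) : Prop := out = detect_special_columns_py_alt columns
instance (columns : List (List (String × String))) (out : List (String × Bool)) : Decidable (Spec_detect_special_columns_py columns out) := by unfold Spec_detect_special_columns_py; infer_instance

-- ===== CLAIM (what is proved, stated in full; the proofs are below) =====
def Claim_equal_detect_special_columns_py : Prop := ∀ (columns : List (List (String × String))), Dom_detect_special_columns_py columns → Spec_detect_special_columns_py columns (detect_special_columns_py columns)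

-- ===== LEMMAS AND PROOFS =====
-- per-column predicates characterising A's flag updates
def dsLocP (col : List (String × String)) : Bool :=
  (dsGetLow col "dataTypeName" == "location" || dsGetLow col "dataTypeName" == "point" ||
   dsGetLow col "dataTypeName" == "multipolygon" || dsGetLow col "dataTypeName" == "polygon") ||
  ["latitude", "longitude", "geom", "geocode", "borough"].any (fun kw => PySem.Str.isIn kw (dsGetLow col "fieldName"))

def dsDateP (col : List (String × String)) : Bool :=
  (dsGetLow col "dataTypeName" == "calendar_date" || dsGetLow col "dataTypeName" == "floating_timestamp" ||
   dsGetLow col "dataTypeName" == "date" || dsGetLow col "dataTypeName" == "meta_data" ||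
   dsGetLow col "dataTypeName" == "timestamp") ||
  PySem.Str.isIn "date" (dsGetLow col "fieldName") || PySem.Str.isIn "date" (dsGetLow col "name")

def dsYearP (col : List (String × String)) : Bool :=
  ((dsGetLow col "dataTypeName" == "number" || dsGetLow col "dataTypeName" == "text") &&
   PySem.Str.isIn "year" (dsGetLow col "fieldName")) ||
  PySem.Str.isIn "fiscal_year" (dsGetLow col "fieldName") ||
  PySem.Str.isIn "school_year" (dsGetLow col "fieldName")

theorem ds_if_or (a c1 c2 : Bool) : (if c2 = true then true else if c1 = true then true else a) = (a || (c1 || c2)) := by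
  cases a <;> cases c1 <;> cases c2 <;> rfl

theorem dsStepA_eq (st : Bool × Bool × Bool) (col : List (String × String)) :
    dsStepA st col = (st.1 || dsLocP col, st.2.1 || dsDateP col, st.2.2 || dsYearP col) := by
  obtain ⟨a, b, c⟩ := st
  simp only [dsStepA, dsLocP, dsDateP, dsYearP, ds_if_or]
  refine Prod.ext rfl (Prod.ext ?_ ?_) <;> simp [Bool.or_assoc]

theorem ds_foldl (columns : List (List (String × String))) (a b c : Bool) :
    columns.foldl dsStepA (a, b, c) =
      (a || columns.any dsLocP, b || columns.any dsDateP, c || columns.any dsYearP) := by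
  induction columns generalizing a b c with
  | nil => simp
  | cons col rest ih =>
      simp only [List.foldl_cons, List.any_cons, dsStepA_eq]
      rw [ih]
      simp [Bool.or_assoc]

-- B's rule evaluation coincides with A's per-column predicates
theorem ds_loc_clauses (col : List (String × String)) :
    dsLocClauses.any (dsClauseHit col) = dsLocP col := by
  simp [dsLocClauses, dsClauseHit, dsLocP, Bool.or_assoc, Bool.beq_eq_decide_eq]

theorem ds_date_clauses (col : List (String × String)) :
    dsDateClauses.any (dsClauseHit col) = dsDateP col := by
  simp [dsDateClauses, dsClauseHit, dsDateP, Bool.or_assoc, Bool.beq_eq_decide_eq]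

theorem ds_year_clauses (col : List (String × String)) :
    dsYearClauses.any (dsClauseHit col) = dsYearP col := by
  simp [dsYearClauses, dsClauseHit, dsYearP, Bool.or_assoc, Bool.beq_eq_decide_eq]

-- ===== VERDICT (by name: the statement is the Claim_ definition above) =====
theorem detect_special_columns_py_spec : Claim_equal_detect_special_columns_py := by
  intro columns _
  show _ = _
  have hl : (fun col => dsLocClauses.any (dsClauseHit col)) = dsLocP := funext ds_loc_clauses
  have hd : (fun col => dsDateClauses.any (dsClauseHit col)) = dsDateP := funext ds_date_clauses
  have hy : (fun col => dsYearClauses.any (dsClauseHit col)) = dsYearP := funext ds_year_clauses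
  simp only [detect_special_columns_py, detect_special_columns_py_alt, dsRules, List.map,
    ds_foldl, Bool.false_or, hl, hd, hy]
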